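-- pv_equiv track=rewrite | github.com/jwohlin2/CAD_Quoting_Tool | src/cad_quoter/utils/sheets.py | to_noncapturing
-- ===== SOURCE A (Python) =====
-- def to_noncapturing(expr: str) -> str:
--     """Convert every capturing ``(`` to a non-capturing ``(?:``."""
--
--     out: list[str] = []
--     i = 0
--     while i < len(expr):
--         ch = expr[i]
--         prev = expr[i - 1] if i > 0 else ""
--         nxt = expr[i + 1] if i + 1 < len(expr) else ""
--         if ch == "(" and prev != "\\" and nxt != "?":
--             out.append("(?:")
--             i += 1
--             continue
--         out.append(ch)
--         i += 1
--     return "".join(out)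
-- ===== SOURCE B (Python) =====
-- def to_noncapturing(expr: str) -> str:
--     """Convert every capturing ``(`` to a non-capturing ``(?:``."""
--     parts = expr.split("(")
--     pieces = [parts[0]]
--     for prev, part in zip(parts, parts[1:]):
--         if prev.endswith("\\") or part.startswith("?"):
--             pieces.append("(" + part)
--         else:
--             pieces.append("(?:" + part)
--     return "".join(pieces)
-- ===== Notes on version B (the rewrite author's own statement) =====
-- stated objective: faster
-- what changed: Replaced A's index-driven per-character while loop (with neighbour lookups at every position) by splitting the string once on the open-paren character and rejoining the segments, deciding at each boundary from the previous segment's last character and the next segment's first character which insert to make; the per-character work moves into str.split/str.join.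
import Mathlib
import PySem

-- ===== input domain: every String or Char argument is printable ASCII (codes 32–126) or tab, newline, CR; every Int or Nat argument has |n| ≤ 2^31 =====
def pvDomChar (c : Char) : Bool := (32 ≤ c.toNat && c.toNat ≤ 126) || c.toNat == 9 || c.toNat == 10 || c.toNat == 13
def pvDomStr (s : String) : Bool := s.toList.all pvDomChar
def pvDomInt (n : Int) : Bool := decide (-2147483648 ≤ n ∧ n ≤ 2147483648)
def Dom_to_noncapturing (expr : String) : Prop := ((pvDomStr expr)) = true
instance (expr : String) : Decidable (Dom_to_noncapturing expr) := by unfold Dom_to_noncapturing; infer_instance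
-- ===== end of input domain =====

-- B replaces A's per-character scan by splitting on '(' and rejoining the segments,
-- deciding each boundary from the previous segment's last char and next segment's first char.

-- ===== PORT A =====
-- A's while loop over index i with accumulator `out`; the absent neighbour "" is Option.none here.
def toNoncapA (cs : List Char) (i : Nat) (out : List Char) : List Char :=
  if h : i < cs.length then
    let ch := cs[i]
    let prev : Option Char := if i > 0 then cs[i-1]? else none
    let nxt : Option Char := cs[i+1]?
    if ch = '(' ∧ prev ≠ some '\\' ∧ nxt ≠ some '?' then
      toNoncapA cs (i+1) (out ++ ['(', '?', ':'])
    else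
      toNoncapA cs (i+1) (out ++ [ch])
  else out
termination_by cs.length - i

def to_noncapturing (expr : String) : String :=
  String.mk (toNoncapA expr.toList 0 [])

-- ===== PORT B =====
-- port of Python's str.split("(") for a one-char separator: returns (first part, remaining parts)
def splitPar : List Char → List Char × List (List Char)
  | [] => ([], [])
  | c :: rest =>
    let (h, t) := splitPar rest
    if c = '(' then ([], h :: t) else (c :: h, t)

-- the loop `for prev, part in zip(parts, parts[1:])`, carrying the previous part
def joinB : List Char → List (List Char) → List Char
  | _, [] => []
  | prev, part :: rest =>
    (if prev.getLast? = some '\\' ∨ part.head? = some '?'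
     then '(' :: part else '(' :: '?' :: ':' :: part) ++ joinB part rest

def to_noncapturing_alt (expr : String) : String :=
  let (p0, rest) := splitPar expr.toList
  String.mk (p0 ++ joinB p0 rest)

-- ===== PRECONDITION & SPEC =====
def Spec_to_noncapturing (expr : String) (out : String) : Prop := out = to_noncapturing_alt expr
instance (expr : String) (out : String) : Decidable (Spec_to_noncapturing expr out) := by unfold Spec_to_noncapturing; infer_instance

-- ===== CLAIM =====
def Claim_equal_to_noncapturing : Prop := ∀ (expr : String), Dom_to_noncapturing expr → Spec_to_noncapturing expr (to_noncapturing expr)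

-- ===== LEMMAS AND PROOFS =====

-- common recursion A is reduced to: carries the previous char
def core : Option Char → List Char → List Char
  | _, [] => []
  | p, c :: rest =>
      (if c = '(' ∧ p ≠ some '\\' ∧ rest.head? ≠ some '?' then ['(', '?', ':'] else [c]) ++ core (some c) rest

lemma toNoncapA_eq_core (cs : List Char) : ∀ i out, toNoncapA cs i out = out ++ core (if i > 0 then cs[i-1]? else none) (cs.drop i) := by
  intro i
  induction hn : cs.length - i using Nat.strong_induction_on generalizing i with
  | _ n ih =>
    intro out
    rw [toNoncapA]
    by_cases h : i < cs.length
    · rw [dif_pos h]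
      have hdrop : cs.drop i = cs[i] :: cs.drop (i+1) := List.drop_eq_getElem_cons h
      have hprev : (if i + 1 > 0 then cs[i+1-1]? else none) = some cs[i] := by
        simp [List.getElem?_eq_getElem h]
      have ihx : ∀ o, toNoncapA cs (i+1) o = o ++ core (some cs[i]) (cs.drop (i+1)) := by
        intro o
        rw [ih (cs.length - (i+1)) (by omega) (i+1) (by omega) o, hprev]
      rw [hdrop]
      simp only [core, List.head?_drop]
      split_ifs <;> simp [ihx]
    · rw [dif_neg h]
      rw [List.drop_eq_nil_of_le (Nat.le_of_not_lt h), core]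
      simp

-- proof-side rejoin with an explicit previous-character context
def emitR : Option Char → List (List Char) → List Char
  | _, [] => []
  | q, part :: rest =>
      (if q = some '\\' ∨ part.head? = some '?'
       then '(' :: part else '(' :: '?' :: ':' :: part) ++ emitR (part.getLast?.or (some '(')) rest

lemma head_splitPar (cs : List Char) : ((splitPar cs).1.head? = some '?') = (cs.head? = some '?') := by
  cases cs with
  | nil => simp [splitPar]
  | cons c rest =>
    simp only [splitPar]
    by_cases hc : c = '('
    · subst hc; simp
    · simp [hc]

lemma getLast_or (c : Char) (h : List Char) (p : Option Char) :
    (c :: h).getLast?.or p = h.getLast?.or (some c) := by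
  cases h with
  | nil => simp
  | cons x xs => rw [List.getLast?_cons_cons]; cases hx : (x :: xs).getLast? with
    | none => simp at hx
    | some y => simp

lemma core_split (cs : List Char) : ∀ p, core p cs = (splitPar cs).1 ++ emitR ((splitPar cs).1.getLast?.or p) (splitPar cs).2 := by
  induction cs with
  | nil => intro p; simp [core, splitPar, emitR]
  | cons c rest ih =>
    intro p
    by_cases hc : c = '('
    · subst hc
      rcases hsp : splitPar rest with ⟨h, t⟩
      have hcond : (rest.head? = some '?') = (h.head? = some '?') := by
        have := head_splitPar rest; rw [hsp] at this; exact this.symm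
      have ihx := ih (some '(')
      rw [hsp] at ihx
      simp only at ihx
      by_cases hb : p = some '\\' ∨ h.head? = some '?'
      · rcases hb with hb | hb
        · simp [core, splitPar, hsp, emitR, Option.or, hb, ihx]
        · have hr : rest.head? = some '?' := by rw [hcond]; exact hb
          simp [core, splitPar, hsp, emitR, Option.or, hb, hr, ihx]
      · rw [not_or] at hb
        have hr : rest.head? ≠ some '?' := by rw [Ne, hcond]; exact hb.2
        simp [core, splitPar, hsp, emitR, Option.or, hb.1, hb.2, hr, ihx]
    · rcases hsp : splitPar rest with ⟨h, t⟩
      have ihx := ih (some c)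
      rw [hsp] at ihx
      simp only at ihx
      have hnotpar : ¬(c = '(' ∧ p ≠ some '\\' ∧ rest.head? ≠ some '?') := fun hx => hc hx.1
      simp only [core, splitPar, hsp, if_neg hc, if_neg hnotpar]
      rw [getLast_or c h p, ihx]
      simp

lemma emitR_joinB : ∀ (parts : List (List Char)) (q : Option Char) (prev : List Char),
    (q = some '\\') = (prev.getLast? = some '\\') → emitR q parts = joinB prev parts := by
  intro parts
  induction parts with
  | nil => intro q prev _; rfl
  | cons part rest ih =>
    intro q prev hq
    simp only [emitR, joinB, hq]
    congr 1
    apply ih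
    cases hl : part.getLast? with
    | none => simp [Option.or]
    | some y => simp [Option.or]

-- ===== VERDICT =====
theorem to_noncapturing_spec : Claim_equal_to_noncapturing := by
  intro expr _
  unfold Spec_to_noncapturing to_noncapturing to_noncapturing_alt
  rcases hsp : splitPar expr.toList with ⟨p0, rest⟩
  rw [toNoncapA_eq_core]
  simp only [List.drop_zero, List.nil_append, gt_iff_lt, Nat.lt_irrefl, if_false]
  rw [core_split, hsp]
  congr 1
  · congr 1
    apply emitR_joinB
    cases p0.getLast? <;> simp [Option.or]
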